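-- pv_equiv track=rewrite | github.com/namin/argument-debugger | as_end2end.py | _F
-- ===== SOURCE A (Python) =====
-- from typing import Dict, List, Set, Tuple, FrozenSet, Optional
--
-- def _F(atoms: List[str], attacks: Set[Tuple[str,str]], S: Set[str]) -> Set[str]:
--     """Characteristic function F(S) over APX atoms (for insights)."""
--     attackers: Dict[str, Set[str]] = {a: set() for a in atoms}
--     for (u,v) in attacks:
--         if v in attackers:
--             attackers[v].add(u)
--     defended = set()
--     for a in atoms:
--         ok = True
--         for b in attackers[a]:
--             if not any((c, b) in attacks for c in S):
--                 ok = False; break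
--         if ok:
--             defended.add(a)
--     return defended
-- ===== SOURCE B (Python) =====
-- def _F(atoms, attacks, S):
--     attacked_by_S = {v for (u, v) in attacks if u in S}
--     undefended = {v for (u, v) in attacks if u not in attacked_by_S}
--     return set(atoms) - undefended
-- ===== Notes on version B (the rewrite author's own statement) =====
-- stated objective: faster
-- what changed: Replaces the attackers-index dict and the nested per-atom/per-attacker/per-S scan with two single passes over the edge list (targets attacked by S, then targets of edges from unattacked sources) and a set complement over atoms.
import Mathlib
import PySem

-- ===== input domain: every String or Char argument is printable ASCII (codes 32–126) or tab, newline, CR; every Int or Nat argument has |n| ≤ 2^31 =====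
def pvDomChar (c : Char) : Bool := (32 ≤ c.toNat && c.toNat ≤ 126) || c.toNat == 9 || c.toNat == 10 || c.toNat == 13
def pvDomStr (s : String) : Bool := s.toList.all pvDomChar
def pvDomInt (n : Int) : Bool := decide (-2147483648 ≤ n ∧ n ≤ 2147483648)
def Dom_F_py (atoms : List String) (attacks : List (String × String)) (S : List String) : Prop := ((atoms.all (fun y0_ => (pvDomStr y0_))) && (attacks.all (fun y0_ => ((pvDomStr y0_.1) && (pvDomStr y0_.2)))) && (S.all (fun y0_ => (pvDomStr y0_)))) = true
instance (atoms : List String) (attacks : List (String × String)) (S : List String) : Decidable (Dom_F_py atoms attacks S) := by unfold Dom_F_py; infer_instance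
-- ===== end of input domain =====

-- B drops A's attackers-index dict and per-atom nested scan: two passes over the edge list plus a set complement. Return value only; timed faster per the check.

-- ===== PORT A =====
def F_py (atoms : List String) (attacks : List (String × String)) (S : List String) : List String :=
  -- attackers = {a: set() for a in atoms}
  let attackers : PySem.Dict String (PySem.Set String) :=
    atoms.foldl (fun d a => d.insert a PySem.Set.empty) PySem.Dict.empty
  -- for (u,v) in attacks: if v in attackers: attackers[v].add(u)
  let attackers :=
    attacks.foldl (fun d uv =>
      if d.contains uv.2 then d.modify uv.2 PySem.Set.empty (fun s => PySem.Set.add s uv.1) else d) attackers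
  -- defended loop; the inner for-with-break computes 'all attackers counter-attacked by S'
  atoms.foldl (fun defended a =>
    if (attackers.getD a PySem.Set.empty).all
         (fun b => S.any (fun c => attacks.contains (c, b)))
    then PySem.Set.add defended a else defended) PySem.Set.empty

-- ===== PORT B =====
def F_py_alt (atoms : List String) (attacks : List (String × String)) (S : List String) : List String :=
  let attackedByS : PySem.Set String :=
    PySem.Set.ofList ((attacks.filter (fun uv => S.contains uv.1)).map (·.2))
  let undefended : PySem.Set String :=
    PySem.Set.ofList ((attacks.filter (fun uv => !(PySem.Set.contains attackedByS uv.1))).map (·.2))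
  PySem.Set.diff (PySem.Set.ofList atoms) undefended

-- ===== PRECONDITION & SPEC =====
def Spec_F_py (atoms : List String) (attacks : List (String × String)) (S : List String) (out : List String) : Prop := out = F_py_alt atoms attacks S
instance (atoms : List String) (attacks : List (String × String)) (S : List String) (out : List String) : Decidable (Spec_F_py atoms attacks S out) := by unfold Spec_F_py; infer_instance

-- ===== CLAIM (what is proved, stated in full; the proofs are below) =====
def Claim_equal_F_py : Prop := ∀ (atoms : List String) (attacks : List (String × String)) (S : List String), Dom_F_py atoms attacks S → Spec_F_py atoms attacks S (F_py atoms attacks S)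

-- ===== LEMMAS AND PROOFS =====

-- every value the first loop inserts is ∅, so every lookup is ∅
lemma getD_init_empty (atoms : List String) (d : PySem.Dict String (PySem.Set String))
    (h : ∀ k, d.getD k PySem.Set.empty = PySem.Set.empty) (k : String) :
    (atoms.foldl (fun d a => d.insert a (PySem.Set.empty : PySem.Set String)) d).getD k PySem.Set.empty = PySem.Set.empty := by
  induction atoms generalizing d with
  | nil => exact h k
  | cons a t ih =>
      refine ih _ (fun j => ?_)
      rw [PySem.Dict.getD_insert]
      split
      · rfl
      · exact h j

-- the modify loop: for a key already present, its set accumulates the sources of edges targetting it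
lemma getD_attack_loop (l : List (String × String)) (d : PySem.Dict String (PySem.Set String))
    (a : String) (h : d.contains a = true) :
    (l.foldl (fun d uv =>
        if d.contains uv.2 then d.modify uv.2 PySem.Set.empty (fun s => PySem.Set.add s uv.1) else d) d).getD
      a PySem.Set.empty
    = PySem.Set.update (d.getD a PySem.Set.empty) ((l.filter (fun uv => uv.2 == a)).map (·.1)) := by
  induction l generalizing d with
  | nil => simp [PySem.Set.update]
  | cons uv t ih =>
      simp only [List.foldl_cons]
      by_cases hc : d.contains uv.2 = true
      · rw [if_pos hc]
        have hcont : (d.modify uv.2 PySem.Set.empty (fun s => PySem.Set.add s uv.1)).contains a = true := by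
          rw [PySem.Dict.contains_modify]; simp [h]
        rw [ih _ hcont, PySem.Dict.getD_modify]
        by_cases hav : a = uv.2
        · subst hav
          simp [PySem.Set.update_cons]
        · have : (uv.2 == a) = false := by simp [beq_eq_false_iff_ne]; exact fun e => hav e.symm
          simp [this, hav]
      · rw [if_neg hc]
        have hva : (uv.2 == a) = false := by
          simp only [beq_eq_false_iff_ne]
          intro e; rw [e] at hc; exact hc h
        rw [ih _ h]
        simp [hva]

-- members of the initial dict's key set are exactly the atoms
lemma contains_init (atoms : List String) (a : String) (ha : a ∈ atoms) :
    ((atoms.foldl (fun d x => d.insert x (PySem.Set.empty : PySem.Set String)) PySem.Dict.empty)).contains a = true := by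
  rw [PySem.Dict.contains_eq_decide_mem_keys, PySem.Dict.keys_foldl_insert]
  simp [PySem.Set.mem_update, ha]

-- ofList commutes with filter
lemma ofList_filter {α : Type} [DecidableEq α] (q : α → Bool) (xs : List α) :
    PySem.Set.ofList (xs.filter q) = (PySem.Set.ofList xs).filter q := by
  induction xs with
  | nil => rfl
  | cons x t ih =>
      by_cases hx : q x = true
      · rw [List.filter_cons_of_pos hx, PySem.Set.ofList_cons, PySem.Set.ofList_cons, ih]
        simp only [List.filter_cons_of_pos hx]
        congr 1
        simp [PySem.Set.discard, List.filter_filter]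
        apply List.filter_congr
        intro y _
        rw [Bool.and_comm]
      · rw [List.filter_cons_of_neg hx, PySem.Set.ofList_cons, ih]
        simp only [List.filter_cons_of_neg hx]
        simp [PySem.Set.discard, List.filter_filter]
        apply List.filter_congr
        intro y hy
        by_cases hq : q y = true
        · have : (y == x) = false := by
            simp only [beq_eq_false_iff_ne]; intro e; subst e; exact hx hq
          simp [this, hq]
        · simp [Bool.eq_false_iff.mpr hq]

-- pointwise: A's per-atom defendedness test equals B's non-membership in 'undefended'
lemma pointwise (atoms : List String) (attacks : List (String × String)) (S : List String)
    (a : String) (ha : a ∈ atoms) :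
    (((attacks.foldl (fun d uv =>
            if d.contains uv.2 then d.modify uv.2 PySem.Set.empty (fun s => PySem.Set.add s uv.1) else d)
          (atoms.foldl (fun d x => d.insert x (PySem.Set.empty : PySem.Set String)) PySem.Dict.empty)).getD
        a PySem.Set.empty).all (fun b => S.any (fun c => attacks.contains (c, b))))
    = !(PySem.Set.contains
        (PySem.Set.ofList ((attacks.filter (fun uv =>
            !(PySem.Set.contains (PySem.Set.ofList ((attacks.filter (fun uv => S.contains uv.1)).map (·.2))) uv.1))).map (·.2))) a) := by
  have hinit := contains_init atoms a ha
  have h0 : ∀ k, ((atoms.foldl (fun d x => d.insert x (PySem.Set.empty : PySem.Set String)) PySem.Dict.empty)).getD k PySem.Set.empty = PySem.Set.empty :=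
    getD_init_empty atoms PySem.Dict.empty (by intro k; rfl)
  rw [getD_attack_loop _ _ a hinit, h0 a]
  -- both sides are decidable statements about membership; compare as Props
  have hQ : ∀ u : String,
      (S.any (fun c => attacks.contains (c, u)) = true) ↔
      (PySem.Set.contains (PySem.Set.ofList ((attacks.filter (fun uv => S.contains uv.1)).map (·.2))) u = true) := by
    intro u
    rw [PySem.Set.contains_iff, PySem.Set.mem_ofList]
    simp only [List.any_eq_true, List.mem_map, List.mem_filter, List.contains_eq_mem, decide_eq_true_eq]
    constructor
    · rintro ⟨c, hc, hm⟩; exact ⟨(c, u), ⟨hm, by simpa using hc⟩, rfl⟩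
    · rintro ⟨⟨c, w⟩, ⟨hm, hc⟩, rfl⟩; exact ⟨c, by simpa using hc, hm⟩
  rcases Bool.eq_false_or_eq_true (PySem.Set.contains
      (PySem.Set.ofList ((attacks.filter (fun uv =>
          !(PySem.Set.contains (PySem.Set.ofList ((attacks.filter (fun uv => S.contains uv.1)).map (·.2))) uv.1))).map (·.2))) a) with hu | hu
  · -- a undefended: some attacker is not counter-attacked
    rw [hu, Bool.not_true]
    rw [PySem.Set.contains_iff, PySem.Set.mem_ofList] at hu
    obtain ⟨⟨u, v⟩, hmf, hva⟩ := List.mem_map.mp hu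
    obtain ⟨hmem, hQu⟩ := List.mem_filter.mp hmf
    have hQu' : PySem.Set.contains (PySem.Set.ofList ((attacks.filter (fun uv => S.contains uv.1)).map (·.2))) u = false := by
      simpa using hQu
    rw [Bool.eq_false_iff]
    intro hall
    have hu_mem : u ∈ PySem.Set.update (PySem.Set.empty : PySem.Set String) ((attacks.filter (fun uv => uv.2 == a)).map (·.1)) := by
      rw [PySem.Set.mem_update]
      right
      exact List.mem_map.mpr ⟨(u, v), List.mem_filter.mpr ⟨hmem, by simpa using hva⟩, rfl⟩
    have := List.all_eq_true.mp hall u hu_mem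
    rw [(hQ u).mp this] at hQu'; cases hQu'

  · -- a not undefended: every attacker is counter-attacked
    rw [hu, Bool.not_false]
    rw [List.all_eq_true]
    intro b hb
    have hbmem : b ∈ (attacks.filter (fun uv => uv.2 == a)).map (·.1) := by
      simpa [PySem.Set.empty] using (PySem.Set.mem_update _ _ _).mp hb
    obtain ⟨⟨b', v⟩, hmf, rfl⟩ := List.mem_map.mp hbmem
    obtain ⟨hmem, hva⟩ := List.mem_filter.mp hmf
    have hva' : v = a := by simpa using hva
    by_contra hnot
    have hQb : PySem.Set.contains (PySem.Set.ofList ((attacks.filter (fun uv => S.contains uv.1)).map (·.2))) b' = false := by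
      rcases Bool.eq_false_or_eq_true (PySem.Set.contains (PySem.Set.ofList ((attacks.filter (fun uv => S.contains uv.1)).map (·.2))) b') with h | h
      · exact absurd ((hQ b').mpr h) hnot
      · exact h
    have : a ∈ (attacks.filter (fun uv =>
        !(PySem.Set.contains (PySem.Set.ofList ((attacks.filter (fun uv => S.contains uv.1)).map (·.2))) uv.1))).map (·.2) := by
      refine List.mem_map.mpr ⟨(b', v), List.mem_filter.mpr ⟨hmem, by simpa using hQb⟩, hva'⟩
    have := (PySem.Set.contains_iff _ _).mpr ((PySem.Set.mem_ofList _ _).mpr this)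
    rw [this] at hu; cases hu
-- ===== VERDICT (by name: the statement is the Claim_ definition above) =====
theorem F_py_spec : Claim_equal_F_py := by
  intro atoms attacks S _
  unfold Spec_F_py F_py F_py_alt
  rw [← List.foldl_filter (f := fun (d : PySem.Set String) a => PySem.Set.add d a)]
  rw [show ∀ (xs : List String), xs.foldl (fun d a => PySem.Set.add d a) PySem.Set.empty = PySem.Set.ofList xs from fun xs => (PySem.Set.ofList_eq_foldl xs).symm]
  rw [ofList_filter]
  rw [show PySem.Set.diff (PySem.Set.ofList atoms)
        (PySem.Set.ofList ((attacks.filter (fun uv =>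
            !(PySem.Set.contains (PySem.Set.ofList ((attacks.filter (fun uv => S.contains uv.1)).map (·.2))) uv.1))).map (·.2)))
      = (PySem.Set.ofList atoms).filter (fun a =>
          !(PySem.Set.contains (PySem.Set.ofList ((attacks.filter (fun uv =>
              !(PySem.Set.contains (PySem.Set.ofList ((attacks.filter (fun uv => S.contains uv.1)).map (·.2))) uv.1))).map (·.2))) a))
      from rfl]
  apply List.filter_congr
  intro a ha
  exact pointwise atoms attacks S a ((PySem.Set.mem_ofList _ _).mp ha)
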